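-- pv_equiv track=rewrite | github.com/MackenzieWhitney1/SubtractionNim | PNLogic.py | quick_init
-- ===== SOURCE A (Python) =====
-- def generate_p(co, p_list):
--     x, y = co
--     if x == y:
--         return True
--     elif x == 0 or y == 0:
--         return False
--     else:
--         if x < y:
--             greater = y
--             lesser = x
--         else:
--             greater = x
--             lesser = y
--         div_ratio = greater // lesser
--         full_move = (greater % lesser, lesser)  # note forced order. building p_list x < y
--
--         if div_ratio == 1:
--             if full_move in p_list:
--                 return False
--             else:
--                 return True
--         else:
--             # if div_ratio > 1, the winning move exists (full_move or alt_move) and is a N position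
--             return False
--
-- def quick_init(upper_bound):
--     p_list = [(0, 0)]
--     previous_min = 0  # for each row, the new min is either equal to previous_min or is previous_min + 1
--     for x in range(upper_bound+1):
--         min_found = False
--         while min_found is False:
--             if generate_p((x, previous_min), p_list) is True:
--                 min_found = True
--             elif generate_p((x, previous_min + 1), p_list) is True:
--                 previous_min += 1
--                 min_found = True
--             else:
--                 break
--         for y in range(previous_min, previous_min+x):
--             p_list.append((x, y))
--     return p_list
-- ===== SOURCE B (Python) =====
-- def quick_init(upper_bound):
--     # P-positions of this Euclid-style game form, per row x >= 1, exactly the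
--     # interval [floor(x/phi)+1, floor(x/phi)+x) of y values (phi = golden ratio).
--     # Maintain f = floor(x/phi) incrementally with an exact integer test:
--     # f+1 <= floor(x/phi)  <=>  (x+2*(f+1))^2 <= 5*x^2.
--     result = [(0, 0)]
--     f = 0
--     for x in range(1, upper_bound + 1):
--         if (x + 2 * (f + 1)) ** 2 <= 5 * x * x:
--             f += 1
--         start = f + 1
--         for y in range(start, start + x):
--             result.append((x, y))
--     return result
-- ===== Notes on version B (the rewrite author's own statement) =====
-- stated objective: faster
-- what changed: Replaces the incremental game search (probing generate_p with linear membership scans over the growing p_list) by the closed-form characterization of the P-positions: row x contributes exactly the interval [floor(x/phi)+1, floor(x/phi)+x), with floor(x/phi) maintained by an exact integer inequality (x+2(f+1))^2 <= 5x^2.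
import Mathlib
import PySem

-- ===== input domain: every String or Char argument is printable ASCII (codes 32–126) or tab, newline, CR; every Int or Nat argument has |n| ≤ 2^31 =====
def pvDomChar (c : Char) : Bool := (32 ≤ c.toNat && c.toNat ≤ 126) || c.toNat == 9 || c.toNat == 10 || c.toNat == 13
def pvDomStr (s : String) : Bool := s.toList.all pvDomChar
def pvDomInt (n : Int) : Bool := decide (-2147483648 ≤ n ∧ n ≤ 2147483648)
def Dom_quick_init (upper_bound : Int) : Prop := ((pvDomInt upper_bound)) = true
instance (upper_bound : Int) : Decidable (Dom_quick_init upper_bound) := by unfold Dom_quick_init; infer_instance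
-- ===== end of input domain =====

-- B replaces A's incremental game search (generate_p probes with membership scans of the
-- growing p_list) by the closed-form interval characterization of the rows, tracking
-- floor(x/phi) with an exact integer test; measured asymptotically faster.

-- ===== PORT A =====
def generate_p (co : Int × Int) (p_list : List (Int × Int)) : Bool :=
  let x := co.1
  let y := co.2
  if x = y then true
  else if x = 0 ∨ y = 0 then false
  else
    let greater := if x < y then y else x
    let lesser := if x < y then x else y
    let div_ratio := PySem.Int.floordiv greater lesser
    let full_move := (PySem.Int.mod greater lesser, lesser)
    if div_ratio = 1 then
      if p_list.contains full_move then false else true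
    else false

-- Python's `while min_found is False:` body always terminates the loop on its first pass
-- (every branch either sets min_found = True or breaks), so it is ported as one conditional.
def quick_init (upper_bound : Int) : List (Int × Int) :=
  let st :=
    (PySem.List.pyRange 0 (upper_bound + 1) 1).foldl
      (fun (st : List (Int × Int) × Int) x =>
        let p_list := st.1
        let previous_min := st.2
        let previous_min :=
          if generate_p (x, previous_min) p_list then previous_min
          else if generate_p (x, previous_min + 1) p_list then previous_min + 1
          else previous_min
        let p_list :=
          (PySem.List.pyRange previous_min (previous_min + x) 1).foldl
            (fun acc y => acc ++ [(x, y)]) p_list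
        (p_list, previous_min))
      ([((0 : Int), (0 : Int))], (0 : Int))
  st.1

-- ===== PORT B =====
def quick_init_alt (upper_bound : Int) : List (Int × Int) :=
  let st :=
    (PySem.List.pyRange 1 (upper_bound + 1) 1).foldl
      (fun (st : List (Int × Int) × Int) x =>
        let result := st.1
        let f := st.2
        let f := if (x + 2 * (f + 1)) ^ 2 ≤ 5 * x * x then f + 1 else f
        let start := f + 1
        let result :=
          (PySem.List.pyRange start (start + x) 1).foldl
            (fun acc y => acc ++ [(x, y)]) result
        (result, f))
      ([((0 : Int), (0 : Int))], (0 : Int))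
  st.1

-- ===== PRECONDITION & SPEC =====
def Spec_quick_init (upper_bound : Int) (out : List (Int × Int)) : Prop := out = quick_init_alt upper_bound
instance (upper_bound : Int) (out : List (Int × Int)) : Decidable (Spec_quick_init upper_bound out) := by unfold Spec_quick_init; infer_instance

-- ===== CLAIM (what is proved, stated in full; the proofs are below) =====
def Claim_equal_quick_init : Prop := ∀ (upper_bound : Int), Dom_quick_init upper_bound → Spec_quick_init upper_bound (quick_init upper_bound)

-- ===== LEMMAS AND PROOFS =====

-- r n = floor(sqrt(5) * n)
def pvR (n : Nat) : Nat := Nat.sqrt (5 * n * n)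
-- F n = floor(n / phi)
def pvF (n : Nat) : Nat := (pvR n - n) / 2
-- M n = start of row n's band of P-positions (0 for the degenerate row 0)
def pvM (n : Nat) : Nat := if n = 0 then 0 else pvF n + 1

-- canonical row band and list of P-positions after rows 0..n
def pvBand (k : Nat) : List (Int × Int) :=
  (PySem.List.pyRange (pvM k) ((pvM k : Int) + (k : Int)) 1).map (fun y => ((k : Int), y))
def pvPlist (n : Nat) : List (Int × Int) :=
  ((0 : Int), (0 : Int)) :: (List.range n).flatMap (fun i => pvBand (i + 1))

lemma pvR_ge (n : Nat) : 2 * n ≤ pvR n := by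
  exact Nat.le_sqrt.mpr (by nlinarith)

lemma pvR_lt (n : Nat) (h : 1 ≤ n) : pvR n < 3 * n := by
  exact Nat.sqrt_lt.mpr (by nlinarith)

lemma pvF_test (c x : Nat) : c ≤ pvF x ↔ (x + 2 * c) * (x + 2 * c) ≤ 5 * x * x := by
  have hr := pvR_ge x
  have h1 : c ≤ pvF x ↔ x + 2 * c ≤ pvR x := by unfold pvF; omega
  rw [h1]
  exact Nat.le_sqrt

lemma pvF_lt (x : Nat) (h : 1 ≤ x) : pvF x < x := by
  have := pvR_lt x h
  unfold pvF; omega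

lemma pvF_step (x : Nat) : pvF x ≤ pvF (x + 1) ∧ pvF (x + 1) ≤ pvF x + 1 := by
  have hs := Nat.sqrt_le (5 * x * x)
  have hl := Nat.lt_succ_sqrt (5 * x * x)
  have hge := pvR_ge x
  have hle3 : pvR x ≤ 3 * x := by
    rcases Nat.eq_zero_or_pos x with h | h
    · subst h; simp [pvR]
    · exact le_of_lt (pvR_lt x h)
  have h1 : pvR x + 1 ≤ pvR (x + 1) := by
    apply Nat.le_sqrt.mpr
    have : pvR x * pvR x ≤ 5 * x * x := hs
    nlinarith
  have h2 : pvR (x + 1) < pvR x + 4 := by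
    apply Nat.sqrt_lt.mpr
    have : 5 * x * x < (pvR x + 1) * (pvR x + 1) := hl
    nlinarith
  unfold pvF; omega

lemma pvM_le (x : Nat) : pvM x ≤ x := by
  unfold pvM
  split_ifs with h
  · omega
  · have := pvF_lt x (by omega)
    omega

lemma pvM_step (x : Nat) : pvM (x + 1) = pvM x ∨ pvM (x + 1) = pvM x + 1 := by
  rcases Nat.eq_zero_or_pos x with h | h
  · subst h
    right
    have hlt : pvR 1 < 3 := Nat.sqrt_lt.mpr (by norm_num)
    have hge : 2 ≤ pvR 1 := Nat.le_sqrt.mpr (by norm_num)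
    have h1 : pvF 1 = 0 := by unfold pvF; omega
    unfold pvM
    norm_num [h1]

  · have := pvF_step x
    unfold pvM
    rw [if_neg (by omega : ¬ x + 1 = 0), if_neg (by omega : ¬ x = 0)]
    omega

lemma pvCore (c x : Nat) (_h1 : 1 ≤ c) (h2 : c < x) (h3 : x < 2 * c) :
    (pvM (x - c) ≤ c ∧ c < pvM (x - c) + (x - c)) ↔ c < pvM x := by
  have ha1 : 1 ≤ x - c := by omega
  have hFa := pvF_lt (x - c) ha1
  have e1 : (pvM (x - c) ≤ c ∧ c < pvM (x - c) + (x - c)) ↔ c - (x - c) ≤ pvF (x - c) := by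
    unfold pvM
    rw [if_neg (by omega : ¬ x - c = 0)]
    omega
  have e2 := pvF_test (c - (x - c)) (x - c)
  have e3 := pvF_test c x
  have eM : (c < pvM x) ↔ c ≤ pvF x := by
    unfold pvM
    rw [if_neg (by omega : ¬ x = 0)]
    omega
  rw [e1, e2, eM, e3]
  set a := x - c with haa
  set d := c - a with hdd
  have hxad : x = a + c ∧ c = a + d ∧ 1 ≤ a ∧ 1 ≤ d := by omega
  obtain ⟨hx, hc, hA, hD⟩ := hxad
  constructor
  · intro h; nlinarith
  · intro h; nlinarith

lemma pvPlist_succ (n : Nat) : pvPlist (n + 1) = pvPlist n ++ pvBand (n + 1) := by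
  simp [pvPlist, List.range_succ]

lemma pvMem_plist (n a b : Nat) :
    ((a : Int), (b : Int)) ∈ pvPlist n ↔
      (a = 0 ∧ b = 0) ∨ (1 ≤ a ∧ a ≤ n ∧ pvM a ≤ b ∧ b < pvM a + a) := by
  induction n with
  | zero =>
    simp only [pvPlist, List.range_zero, List.flatMap_nil,
      List.mem_singleton, Prod.mk.injEq]
    constructor
    · rintro ⟨h1, h2⟩
      exact Or.inl ⟨by exact_mod_cast h1, by exact_mod_cast h2⟩
    · rintro (⟨h1, h2⟩ | ⟨_, h2, _⟩)
      · subst h1; subst h2; exact ⟨rfl, rfl⟩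
      · omega
  | succ n ih =>
    rw [pvPlist_succ, List.mem_append, ih]
    have hband : (((a : Int), (b : Int)) ∈ pvBand (n + 1)) ↔
        (a = n + 1 ∧ pvM (n + 1) ≤ b ∧ b < pvM (n + 1) + (n + 1)) := by
      simp only [pvBand, List.mem_map, PySem.List.mem_pyRange_one, Prod.mk.injEq]
      constructor
      · rintro ⟨y, ⟨hy1, hy2⟩, hk, hy⟩
        subst hy
        refine ⟨by exact_mod_cast hk.symm, by exact_mod_cast hy1, ?_⟩
        have : (b : Int) < (pvM (n + 1) : Int) + ((n : Int) + 1) := hy2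
        exact_mod_cast this
      · rintro ⟨hk, h1, h2⟩
        refine ⟨(b : Int), ⟨by exact_mod_cast h1, ?_⟩, by exact_mod_cast hk.symm, rfl⟩
        push_cast
        exact_mod_cast h2
    rw [hband]
    constructor
    · rintro ((h | ⟨h1, h2, h3⟩) | ⟨h1, h2⟩)
      · exact Or.inl h
      · exact Or.inr ⟨h1, by omega, h3⟩
      · subst h1
        exact Or.inr ⟨by omega, by omega, h2⟩
    · rintro (h | ⟨h1, h2, h3⟩)
      · exact Or.inl (Or.inl h)
      · rcases Nat.lt_or_ge a (n + 1) with hlt | hge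
        · exact Or.inl (Or.inr ⟨h1, by omega, h3⟩)
        · have heq : a = n + 1 := by omega
          subst heq
          exact Or.inr ⟨rfl, h3⟩


lemma pvProbe (x c : Nat) (hx : 1 ≤ x) (hc : c ≤ x) :
    generate_p ((x : Int), (c : Int)) (pvPlist (x - 1)) = decide (pvM x ≤ c) := by
  have hM1 : 1 ≤ pvM x := by
    unfold pvM
    rw [if_neg (by omega : ¬ x = 0)]
    omega
  rcases Nat.eq_or_lt_of_le hc with hcx | hcx
  · subst hcx
    simp [generate_p, pvM_le c]
  · have hne1 : ¬ ((x : Int) = (c : Int)) := by omega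
    rcases Nat.eq_zero_or_pos c with hc0 | hc1
    · subst hc0
      simp only [generate_p]
      rw [if_neg hne1, if_pos (Or.inr (by norm_num : ((0 : Nat) : Int) = 0))]
      have : ¬ pvM x ≤ 0 := by omega
      simp [this]
    · -- 1 ≤ c < x
      have hne2 : ¬ ((x : Int) = 0 ∨ (c : Int) = 0) := by omega
      have hnlt : ¬ ((x : Int) < (c : Int)) := by omega
      simp only [generate_p, if_neg hne1, if_neg hne2, if_neg hnlt]
      rw [PySem.Int.floordiv_natCast, PySem.Int.mod_natCast]
      rcases Nat.lt_or_ge x (2 * c) with hx2 | hx2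
      · -- x < 2c : quotient is 1
        have hdiv : x / c = 1 := Nat.div_eq_of_lt_le (by omega) (by omega)
        have hmodv : x % c = x - c := by
          have hda := Nat.div_add_mod x c
          rw [hdiv] at hda
          omega
        rw [hdiv, hmodv, if_pos (by norm_num : ((1 : Nat) : Int) = 1)]
        have hmem : ((((x - c : Nat) : Int), (c : Int)) ∈ pvPlist (x - 1)) ↔ c < pvM x := by
          rw [pvMem_plist]
          rw [← pvCore c x hc1 hcx hx2]
          constructor
          · rintro (⟨h1, _⟩ | ⟨_, _, h3, h4⟩)
            · omega
            · exact ⟨h3, h4⟩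
          · rintro ⟨h3, h4⟩
            exact Or.inr ⟨by omega, by omega, h3, h4⟩
        by_cases hm : (((x - c : Nat) : Int), (c : Int)) ∈ pvPlist (x - 1)
        · rw [if_pos (List.contains_iff_mem.mpr hm)]
          have := hmem.mp hm
          simp
          omega
        · rw [if_neg (fun hcont => hm (List.contains_iff_mem.mp hcont))]
          have : ¬ c < pvM x := fun h => hm (hmem.mpr h)
          simp
          omega
      · -- 2c ≤ x : quotient ≥ 2
        have hdiv : 2 ≤ x / c := (Nat.le_div_iff_mul_le hc1).mpr (by omega)
        rw [if_neg (by omega : ¬ ((x / c : Nat) : Int) = 1)]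
        have h1 : c ≤ pvF x := (pvF_test c x).mpr (by nlinarith)
        have h2 : ¬ pvM x ≤ c := by
          unfold pvM
          rw [if_neg (by omega : ¬ x = 0)]
          omega
        simp [h2]



lemma pvA_loop (n : Nat) :
    (PySem.List.pyRange 0 ((n : Int) + 1) 1).foldl
      (fun (st : List (Int × Int) × Int) x =>
        let p_list := st.1
        let previous_min := st.2
        let previous_min :=
          if generate_p (x, previous_min) p_list then previous_min
          else if generate_p (x, previous_min + 1) p_list then previous_min + 1
          else previous_min
        let p_list :=
          (PySem.List.pyRange previous_min (previous_min + x) 1).foldl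
            (fun acc y => acc ++ [(x, y)]) p_list
        (p_list, previous_min))
      ([((0 : Int), (0 : Int))], (0 : Int)) = (pvPlist n, (pvM n : Int)) := by
  induction n with
  | zero =>
    rw [show ((0 : Nat) : Int) + 1 = 0 + 1 by norm_num, PySem.List.pyRange_one_singleton]
    simp only [List.foldl_cons, List.foldl_nil]
    have hg : generate_p ((0 : Int), (0 : Int)) [((0 : Int), (0 : Int))] = true := by
      simp [generate_p]
    simp only [hg, if_pos]
    rw [show (0 : Int) + 0 = 0 by ring, PySem.List.pyRange_one_eq_nil (le_refl 0)]
    simp [pvPlist, pvM]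
  | succ n ih =>
    rw [show ((n + 1 : Nat) : Int) + 1 = ((n : Int) + 1) + 1 by push_cast; ring,
      PySem.List.pyRange_one_succ_right (by positivity), List.foldl_append, ih]
    simp only [List.foldl_cons, List.foldl_nil]
    have hc1 : ((n : Int) + 1) = ((n + 1 : Nat) : Int) := by push_cast; ring
    have hp1 : generate_p ((n : Int) + 1, (pvM n : Int)) (pvPlist n) =
        decide (pvM (n + 1) ≤ pvM n) := by
      rw [hc1, show pvPlist n = pvPlist ((n + 1) - 1) from rfl]
      exact pvProbe (n + 1) (pvM n) (by omega) (le_trans (pvM_le n) (by omega))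
    have hp2 : generate_p ((n : Int) + 1, (pvM n : Int) + 1) (pvPlist n) =
        decide (pvM (n + 1) ≤ pvM n + 1) := by
      rw [hc1, show ((pvM n : Int) + 1) = ((pvM n + 1 : Nat) : Int) by push_cast; ring,
        show pvPlist n = pvPlist ((n + 1) - 1) from rfl]
      exact pvProbe (n + 1) (pvM n + 1) (by omega) (by have := pvM_le n; omega)
    have hprev : (if generate_p ((n : Int) + 1, (pvM n : Int)) (pvPlist n) = true then (pvM n : Int)
        else if generate_p ((n : Int) + 1, (pvM n : Int) + 1) (pvPlist n) = true then (pvM n : Int) + 1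
        else (pvM n : Int)) = ((pvM (n + 1) : Nat) : Int) := by
      rw [hp1, hp2]
      rcases pvM_step n with h | h
      · rw [if_pos (by simp [h])]
        omega
      · rw [if_neg (by simp [h]), if_pos (by simp [h])]
        omega
    rw [hprev]
    rw [PySem.List.foldl_append_singleton_eq_map]
    rw [pvPlist_succ]
    congr 1


lemma pvB_loop (n : Nat) :
    (PySem.List.pyRange 1 ((n : Int) + 1) 1).foldl
      (fun (st : List (Int × Int) × Int) x =>
        let result := st.1
        let f := st.2
        let f := if (x + 2 * (f + 1)) ^ 2 ≤ 5 * x * x then f + 1 else f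
        let start := f + 1
        let result :=
          (PySem.List.pyRange start (start + x) 1).foldl
            (fun acc y => acc ++ [(x, y)]) result
        (result, f))
      ([((0 : Int), (0 : Int))], (0 : Int)) = (pvPlist n, (pvF n : Int)) := by
  induction n with
  | zero =>
    rw [show ((0 : Nat) : Int) + 1 = 1 by norm_num, PySem.List.pyRange_one_eq_nil (le_refl 1)]
    simp [pvPlist, pvF, pvR]
  | succ n ih =>
    rw [show ((n + 1 : Nat) : Int) + 1 = ((n : Int) + 1) + 1 by push_cast; ring,
      PySem.List.pyRange_one_succ_right (by omega), List.foldl_append, ih]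
    simp only [List.foldl_cons, List.foldl_nil]
    have htest : ((((n : Int) + 1) + 2 * ((pvF n : Int) + 1)) ^ 2 ≤ 5 * ((n : Int) + 1) * ((n : Int) + 1)) ↔
        pvF n + 1 ≤ pvF (n + 1) := by
      rw [pvF_test (pvF n + 1) (n + 1), pow_two]
      exact_mod_cast Iff.rfl
    have hstep := pvF_step n
    have hf : (if (((n : Int) + 1) + 2 * ((pvF n : Int) + 1)) ^ 2 ≤ 5 * ((n : Int) + 1) * ((n : Int) + 1)
        then (pvF n : Int) + 1 else (pvF n : Int)) = ((pvF (n + 1) : Nat) : Int) := by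
      by_cases h : pvF n + 1 ≤ pvF (n + 1)
      · rw [if_pos (htest.mpr h)]
        have heq : pvF (n + 1) = pvF n + 1 := by omega
        omega
      · rw [if_neg (fun hh => h (htest.mp hh))]
        have heq : pvF (n + 1) = pvF n := by omega
        omega
    rw [hf]
    rw [PySem.List.foldl_append_singleton_eq_map]
    rw [pvPlist_succ]
    congr 1


-- ===== VERDICT (by name: the statement is the Claim_ definition above) =====
theorem quick_init_spec : Claim_equal_quick_init := by
  intro ub _
  unfold Spec_quick_init quick_init quick_init_alt
  rcases le_or_gt 0 ub with h | h
  · obtain ⟨n, rfl⟩ : ∃ n : Nat, ub = (n : Int) := ⟨ub.toNat, (Int.toNat_of_nonneg h).symm⟩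
    rw [pvA_loop n, pvB_loop n]
  · rw [PySem.List.pyRange_one_eq_nil (by omega), PySem.List.pyRange_one_eq_nil (by omega)]
    rfl
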